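-- pv_equiv track=rewrite | github.com/wzygxr/shuati | class063_PrimeNumberAlgorithms/Code04_EhrlichAndEuler.py | prime_distribution
-- ===== SOURCE A (Python) =====
-- from typing import List, Tuple
--
-- def get_all_primes(n: int) -> List[int]:
--     """
--     获取0~n范围内的所有质数列表
--     使用欧拉筛算法，时间复杂度O(n)
--
--     Args:
--         n: 范围上限（包含）
--     Returns:
--         质数列表
--     """
--     if n < 2:
--         return []
--
--     is_composite = [False] * (n + 1)
--     primes = []
--
--     for i in range(2, n + 1):
--         if not is_composite[i]:
--             primes.append(i)
--         for p in primes: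
--             if i * p > n:
--                 break
--             is_composite[i * p] = True
--             if i % p == 0:
--                 break
--
--     return primes
--
-- def prime_distribution(n: int, buckets: int = 10) -> List[Tuple[int, int]]:
--     """
--     统计质数的分布情况
--
--     Args:
--         n: 范围上限
--         buckets: 桶的数量
--     Returns:
--         每个桶的范围和质数数量
--     """
--     primes = get_all_primes(n)
--     bucket_size = (n + buckets - 1) // buckets  # 向上取整
--     distribution = []
--
--     for i in range(buckets):
--         start = i * bucket_size + 1
--         end = min((i + 1) * bucket_size, n)
--         count = sum(1 for p in primes if start <= p <= end)
--         distribution.append((start, end, count))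
--
--     return distribution
-- ===== SOURCE B (Python) =====
-- from typing import List, Tuple
--
-- def get_all_primes(n: int) -> List[int]:
--     if n < 2:
--         return []
--     is_composite = [False] * (n + 1)
--     primes = []
--     for i in range(2, n + 1):
--         if not is_composite[i]:
--             primes.append(i)
--         for p in primes:
--             if i * p > n:
--                 break
--             is_composite[i * p] = True
--             if i % p == 0:
--                 break
--     return primes
--
-- def prime_distribution(n: int, buckets: int = 10) -> List[Tuple[int, int]]:
--     primes = get_all_primes(n)
--     bucket_size = (n + buckets - 1) // buckets
--     counts = [0] * max(buckets, 0)
--     for p in primes: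
--         counts[(p - 1) // bucket_size] += 1
--     return [(i * bucket_size + 1, min((i + 1) * bucket_size, n), counts[i])
--             for i in range(buckets)]
-- ===== Notes on version B (the rewrite author's own statement) =====
-- stated objective: faster
-- what changed: Replaced the per-bucket rescan of the whole prime list (sum over primes for each of the buckets ranges) by one counting pass over the primes into an index array counts[(p-1)//bucket_size], then a single comprehension builds the (start,end,count) triples.
-- outside the precondition, e.g. on prime_distribution(10, -2): A returns [], B raises IndexError
import Mathlib
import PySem

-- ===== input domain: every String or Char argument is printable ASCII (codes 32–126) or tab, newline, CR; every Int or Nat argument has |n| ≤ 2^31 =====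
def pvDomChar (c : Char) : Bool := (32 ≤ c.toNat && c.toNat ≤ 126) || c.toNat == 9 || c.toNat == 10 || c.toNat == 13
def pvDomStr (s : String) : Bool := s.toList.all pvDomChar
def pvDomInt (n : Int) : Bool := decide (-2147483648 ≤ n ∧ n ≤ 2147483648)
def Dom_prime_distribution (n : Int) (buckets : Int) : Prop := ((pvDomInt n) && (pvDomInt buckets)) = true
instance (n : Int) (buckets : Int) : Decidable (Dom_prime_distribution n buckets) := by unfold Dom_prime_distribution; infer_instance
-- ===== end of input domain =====

-- B replaces A's per-bucket rescan of the prime list by one counting pass over the primes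
-- into a counts array indexed by (p-1)//bucket_size (objective: faster).

-- ===== PORT A =====
-- inner 'for p in primes' loop of the Euler sieve (with its two breaks)
def sieveInner (n i : Int) : List Int → Array Bool → Array Bool
  | [], comp => comp
  | p :: rest, comp =>
    if i * p > n then comp
    else
      let comp' := comp.setIfInBounds (i * p).toNat true
      if PySem.Int.mod i p = 0 then comp' else sieveInner n i rest comp'

def get_all_primes (n : Int) : List Int :=
  if n < 2 then []
  else
    let st := (PySem.List.pyRange 2 (n + 1)).foldl
      (fun (st : Array Bool × List Int) i =>
        let primes := if st.1.getD i.toNat false then st.2 else st.2 ++ [i]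
        (sieveInner n i primes st.1, primes))
      (Array.replicate (n + 1).toNat false, [])
    st.2

def prime_distribution (n : Int) (buckets : Int) : List (Int × Int × Int) :=
  let primes := get_all_primes n
  let bucket_size := PySem.Int.floordiv (n + buckets - 1) buckets
  (PySem.List.pyRange 0 buckets).foldl
    (fun acc i =>
      let start := i * bucket_size + 1
      let e := min ((i + 1) * bucket_size) n
      let count := primes.foldl
        (fun c p => if start ≤ p ∧ p ≤ e then c + 1 else c) (0 : Int)
      acc ++ [(start, e, count)]) []

-- ===== PORT B =====
def prime_distribution_alt (n : Int) (buckets : Int) : List (Int × Int × Int) :=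
  let primes := get_all_primes n
  let bucket_size := PySem.Int.floordiv (n + buckets - 1) buckets
  let counts := primes.foldl
    (fun (cs : Array Int) p =>
      cs.modify (PySem.Int.floordiv (p - 1) bucket_size).toNat (· + 1))
    (Array.replicate (max buckets 0).toNat (0 : Int))
  (PySem.List.pyRange 0 buckets).map
    (fun i => (i * bucket_size + 1, min ((i + 1) * bucket_size) n, counts.getD i.toNat 0))

-- ===== PRECONDITION & SPEC =====
-- Pre_ excludes buckets ≤ 0 (nonsensical bucket counts, except the trivial n < 2 case with no primes):
-- at buckets = 0 A raises ZeroDivisionError; at buckets < 0 with n ≥ 2 A returns [] from an empty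
-- range while B's counting pass raises IndexError.
def Pre_prime_distribution (n : Int) (buckets : Int) : Prop :=
  1 ≤ buckets ∨ (buckets ≠ 0 ∧ n < 2)
instance (n : Int) (buckets : Int) : Decidable (Pre_prime_distribution n buckets) := by unfold Pre_prime_distribution; infer_instance

def pvWitness_prime_distribution : Int × Int := (20, 3)

def Spec_prime_distribution (n : Int) (buckets : Int) (out : List (Int × Int × Int)) : Prop := out = prime_distribution_alt n buckets
instance (n : Int) (buckets : Int) (out : List (Int × Int × Int)) : Decidable (Spec_prime_distribution n buckets out) := by unfold Spec_prime_distribution; infer_instance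

-- ===== CLAIM (what is proved, stated in full; the proofs are below) =====
def Claim_equal_prime_distribution : Prop := ∀ (n : Int) (buckets : Int), Dom_prime_distribution n buckets → Pre_prime_distribution n buckets → Spec_prime_distribution n buckets (prime_distribution n buckets)

-- ===== LEMMAS AND PROOFS =====

-- every prime the sieve produces lies in [2, n]
theorem sieve_fold_mem (n : Int) (l : List Int) (hl : ∀ i ∈ l, 2 ≤ i ∧ i ≤ n)
    (st : Array Bool × List Int) (hst : ∀ p ∈ st.2, 2 ≤ p ∧ p ≤ n) :
    ∀ p ∈ (l.foldl
      (fun (st : Array Bool × List Int) i =>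
        let primes := if st.1.getD i.toNat false then st.2 else st.2 ++ [i]
        (sieveInner n i primes st.1, primes)) st).2, 2 ≤ p ∧ p ≤ n := by
  induction l generalizing st with
  | nil => exact hst
  | cons a l ih =>
    refine ih (fun i hi => hl i (List.mem_cons_of_mem _ hi)) _ ?_
    intro p hp
    by_cases h : st.1.getD a.toNat false
    · simp only [h, if_true] at hp; exact hst p hp
    · simp only [h] at hp
      rcases List.mem_append.mp hp with h' | h'
      · exact hst p h'
      · simp at h'; subst h'; exact hl p (List.mem_cons_self)

theorem get_all_primes_mem (n : Int) : ∀ p ∈ get_all_primes n, 2 ≤ p ∧ p ≤ n := by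
  unfold get_all_primes
  split
  · simp
  · exact sieve_fold_mem n _ (fun i hi => by
      have := PySem.List.mem_pyRange_one.mp hi; omega) _ (by simp)

-- the counting pass read at one index
theorem fold_modify_getD (g : Int → Nat) (ps : List Int) (cs : Array Int) (j : Nat)
    (hj : j < cs.size) :
    (ps.foldl (fun (cs : Array Int) p => cs.modify (g p) (· + 1)) cs).getD j 0
      = cs.getD j 0 + (ps.countP (fun p => g p == j) : Int) := by
  induction ps generalizing cs with
  | nil => simp
  | cons p ps ih =>
    simp only [List.foldl_cons, List.countP_cons]
    have h1 : (cs.modify (g p) (· + 1)).getD j 0 = if g p = j then cs.getD j 0 + 1 else cs.getD j 0 := by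
      rw [Array.getD_eq_getD_getElem?, Array.getD_eq_getD_getElem?]
      rw [Array.getElem?_eq_getElem (by simpa using hj), Array.getElem?_eq_getElem hj]
      simp [Array.getElem_modify]
    rw [ih _ (by simpa using hj), h1]
    by_cases h : g p = j
    · rw [if_pos h]
      simp only [h, beq_self_eq_true, if_true]
      push_cast; ring
    · rw [if_neg h]
      have hb : (g p == j) = false := by simpa using h
      simp [hb]

theorem bracket_iff (bs i p : Int) (hbs : 0 < bs) :
    (i * bs + 1 ≤ p ∧ p ≤ (i + 1) * bs) ↔ PySem.Int.floordiv (p - 1) bs = i := by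
  rw [PySem.Int.floordiv_eq_iff_of_pos hbs]
  constructor
  · rintro ⟨h1, h2⟩
    exact ⟨by linarith, by linarith⟩
  · rintro ⟨h1, h2⟩
    have h3 := Int.add_one_le_iff.mpr h2
    exact ⟨by linarith, by linarith⟩

-- per-bucket: A's rescan count equals B's counts-array entry
theorem count_eq (n buckets i : Int) (hb : 1 ≤ buckets) (hi0 : 0 ≤ i) (hib : i < buckets) :
    (get_all_primes n).foldl
      (fun c p => if i * PySem.Int.floordiv (n + buckets - 1) buckets + 1 ≤ p ∧
          p ≤ min ((i + 1) * PySem.Int.floordiv (n + buckets - 1) buckets) n then c + 1 else c)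
      (0 : Int)
    = ((get_all_primes n).foldl
        (fun (cs : Array Int) p =>
          cs.modify (PySem.Int.floordiv (p - 1) (PySem.Int.floordiv (n + buckets - 1) buckets)).toNat (· + 1))
        (Array.replicate (max buckets 0).toNat (0 : Int))).getD i.toNat 0 := by
  set bs := PySem.Int.floordiv (n + buckets - 1) buckets with hbsdef
  rw [fold_modify_getD _ _ _ _ (by simp; omega)]
  have hz : (Array.replicate (max buckets 0).toNat (0 : Int)).getD i.toNat 0 = 0 := by
    rw [Array.getD_eq_getD_getElem?]
    rcases Nat.lt_or_ge i.toNat (max buckets 0).toNat with h | h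
    · rw [Array.getElem?_eq_getElem (by simpa using h)]; simp
    · rw [Array.getElem?_eq_none (by simpa using h)]; rfl
  rw [hz]
  have hc := PySem.List.foldl_count_if
    (fun p => decide (i * bs + 1 ≤ p ∧ p ≤ min ((i + 1) * bs) n)) (get_all_primes n) 0
  simp only [decide_eq_true_eq] at hc
  rw [hc, zero_add, zero_add]
  congr 1
  apply List.countP_congr
  intro p hp
  obtain ⟨hp2, hpn⟩ := get_all_primes_mem n p hp
  have hbs1 : 1 ≤ bs := by
    rw [hbsdef, PySem.Int.le_floordiv_iff_mul_le (by omega)]; omega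
  have hd0 : 0 ≤ PySem.Int.floordiv (p - 1) bs := by
    rw [PySem.Int.le_floordiv_iff_mul_le (by omega)]; omega
  have hbr := bracket_iff bs i p (by omega)
  simp only [decide_eq_true_eq, beq_iff_eq, le_min_iff]
  constructor
  · rintro ⟨h1, h2, h3⟩
    have := hbr.mp ⟨h1, h2⟩; omega
  · intro h
    have hdi : PySem.Int.floordiv (p - 1) bs = i := by omega
    have h2 := hbr.mpr hdi
    exact ⟨h2.1, h2.2, hpn⟩

theorem pyRange_nil_of_le (a b : Int) (h : b ≤ a) : PySem.List.pyRange a b = [] := by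
  rw [List.eq_nil_iff_forall_not_mem]
  intro x hx
  have := PySem.List.mem_pyRange_one.mp hx
  omega

-- ===== VERDICT (by name: the statement is the Claim_ definition above) =====
theorem prime_distribution_spec : Claim_equal_prime_distribution := by
  intro n buckets _ hpre
  unfold Spec_prime_distribution prime_distribution prime_distribution_alt
  by_cases hb : 1 ≤ buckets
  · simp only [PySem.List.foldl_append_singleton_eq_map, List.nil_append]
    apply List.map_congr_left
    intro i hi
    obtain ⟨hi0, hib⟩ := PySem.List.mem_pyRange_one.mp hi
    rw [count_eq n buckets i hb hi0 hib]
  · have hn : n < 2 := by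
      rcases hpre with h | h
      · omega
      · exact h.2
    rw [pyRange_nil_of_le 0 buckets (by omega)]
    simp
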